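-- pv_equiv track=rewrite | github.com/Shubham37204/DSA | ReserveTriangle.py | reverseTriangle
-- ===== SOURCE A (Python) =====
-- from typing import List
--
-- def reverseTriangle(n: int) -> List[str]:
--     """
--     Generate reverse triangle pattern with descending numbers.
--
--     Args:
--         n: Number of rows
--
--     Returns:
--         List of strings representing each row
--
--     Time Complexity: O(n^2)
--     Space Complexity: O(n^2)
--     """
--     result = []
--
--     for i in range(1, n + 1):
--         row = ""
--         for j in range(i, 0, -1):
--             row += str(j)
--         result.append(row)
--
--     return result
-- ===== SOURCE B (Python) =====
-- def reverseTriangle(n):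
--     result = []
--     prev = ""
--     for i in range(1, n + 1):
--         prev = str(i) + prev
--         result.append(prev)
--     return result
-- ===== Notes on version B (the rewrite author's own statement) =====
-- stated objective: faster
-- what changed: Replaces the nested descending inner loop (rebuilding each row character-group by character-group) with a single flat pass that keeps the previous row in an accumulator and prepends str(i), using the recurrence row(i) = str(i) + row(i-1).
import Mathlib
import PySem

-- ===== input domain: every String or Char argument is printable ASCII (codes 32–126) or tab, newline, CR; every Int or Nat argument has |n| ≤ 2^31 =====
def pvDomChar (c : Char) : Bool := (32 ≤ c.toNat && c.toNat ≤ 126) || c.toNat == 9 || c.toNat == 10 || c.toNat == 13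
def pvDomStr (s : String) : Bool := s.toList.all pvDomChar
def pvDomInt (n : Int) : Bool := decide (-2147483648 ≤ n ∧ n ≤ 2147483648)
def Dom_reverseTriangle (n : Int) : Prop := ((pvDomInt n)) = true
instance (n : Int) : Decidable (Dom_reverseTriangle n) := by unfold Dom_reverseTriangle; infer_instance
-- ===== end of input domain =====

-- B replaces A's nested descending inner loop by one flat pass keeping the previous row
-- as an accumulator (row(i) = str(i) + row(i-1)); simpler, same return value.

-- ===== PORT A =====
def reverseTriangle (n : Int) : List String :=
  (PySem.List.pyRange 1 (n + 1) 1).foldl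
    (fun result i =>
      result ++ [(PySem.List.pyRange i 0 (-1)).foldl
        (fun row j => row ++ PySem.Int.toStr j) ""])
    []

-- ===== PORT B =====
def reverseTriangle_alt (n : Int) : List String :=
  ((PySem.List.pyRange 1 (n + 1) 1).foldl
    (fun (st : List String × String) i =>
      let p := PySem.Int.toStr i ++ st.2
      (st.1 ++ [p], p))
    ([], "")).1

-- ===== PRECONDITION & SPEC =====
def Spec_reverseTriangle (n : Int) (out : List String) : Prop := out = reverseTriangle_alt n
instance (n : Int) (out : List String) : Decidable (Spec_reverseTriangle n out) := by unfold Spec_reverseTriangle; infer_instance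

-- ===== CLAIM (what is proved, stated in full; the proofs are below) =====
def Claim_equal_reverseTriangle : Prop := ∀ (n : Int), Dom_reverseTriangle n → Spec_reverseTriangle n (reverseTriangle n)

-- ===== LEMMAS AND PROOFS =====

-- A's inner loop for row i
def pvInner (i : Int) : String :=
  (PySem.List.pyRange i 0 (-1)).foldl (fun row j => row ++ PySem.Int.toStr j) ""

-- pull the accumulator out of A's inner fold
theorem pvInner_acc (L : List Int) (a : String) :
    L.foldl (fun row j => row ++ PySem.Int.toStr j) a
      = a ++ L.foldl (fun row j => row ++ PySem.Int.toStr j) "" := by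
  induction L generalizing a with
  | nil => simp
  | cons x xs ih =>
      simp only [List.foldl_cons]
      rw [ih (a ++ PySem.Int.toStr x), ih ("" ++ PySem.Int.toStr x)]
      simp [String.append_assoc]

-- recurrence: row(i) = str(i) ++ row(i-1) for 0 < i
theorem pvInner_succ (i : Int) (h : 0 < i) :
    pvInner i = PySem.Int.toStr i ++ pvInner (i - 1) := by
  unfold pvInner
  rw [PySem.List.pyRange_neg_one_cons h]
  simp only [List.foldl_cons]
  rw [pvInner_acc]
  simp

-- loop invariant: B's fold carries (A's rows so far, the last row, i.e. pvInner m)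
theorem pvLoop (m : Nat) :
    ((PySem.List.pyRange 1 ((m : Int) + 1) 1).foldl
        (fun (st : List String × String) i =>
          let p := PySem.Int.toStr i ++ st.2
          (st.1 ++ [p], p))
        ([], ""))
      = ((PySem.List.pyRange 1 ((m : Int) + 1) 1).foldl
          (fun result i => result ++ [pvInner i]) [],
         pvInner (m : Int)) := by
  induction m with
  | zero =>
      rw [PySem.List.pyRange_one_eq_nil (by norm_num)]
      simp [pvInner, PySem.List.pyRange_neg_one_eq_nil (by norm_num : (0:Int) ≤ 0)]
  | succ k ih =>
      have h1 : (1 : Int) ≤ (k : Int) + 1 := by omega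
      have hsplit : PySem.List.pyRange 1 (((k + 1 : Nat) : Int) + 1) 1
          = PySem.List.pyRange 1 ((k : Int) + 1) 1 ++ [(k : Int) + 1] := by
        push_cast
        exact PySem.List.pyRange_one_succ_right h1
      rw [hsplit, List.foldl_append, List.foldl_append, ih]
      have hrec : pvInner ((k : Int) + 1) = PySem.Int.toStr ((k : Int) + 1) ++ pvInner (k : Int) := by
        have := pvInner_succ ((k : Int) + 1) (by omega)
        simpa using this
      push_cast
      simp [hrec]

-- ===== VERDICT (by name: the statement is the Claim_ definition above) =====
theorem reverseTriangle_spec : Claim_equal_reverseTriangle := by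
  intro n _
  unfold Spec_reverseTriangle reverseTriangle reverseTriangle_alt
  by_cases hn : n ≤ 0
  · rw [PySem.List.pyRange_one_eq_nil (by omega)]
    simp
  · have hm : n = ((n.toNat : Int)) := by omega
    rw [hm, pvLoop n.toNat]
    simp [pvInner]
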